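-- pv_equiv track=rewrite | github.com/SeonkookHeo/CodeTest | Chap2_1.py | solution
-- ===== SOURCE A (Python) =====
-- def solution(n, A, i1, j1, i2, j2, k):
--
--     answer = 0
--     for i in range(i1, i2 + 1):
--         for j in range (j1, j2 + 1):
--             A[i][j] = A[i][j] * k
--
--     for i in range(n):
--         answer += sum(A[i])
--
--     return answer
-- ===== SOURCE B (Python) =====
-- def solution(n, A, i1, j1, i2, j2, k):
--     # Closed form, no mutation: the answer is the plain sum of the first n rows
--     # plus (k - 1) times the sum of the block being scaled.
--     total = sum(sum(A[i]) for i in range(n))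
--     block = sum(A[i][j] for i in range(i1, i2 + 1) for j in range(j1, j2 + 1))
--     return total + (k - 1) * block
-- ===== Notes on version B (the rewrite author's own statement) =====
-- stated objective: simpler
-- what changed: Replaces the in-place scaling pass followed by a summation of the mutated matrix with a closed form, total + (k-1)*block, computed from the unchanged matrix in two comprehensions (B does not mutate A); Pre_ restricts to the natural domain where the scaled block is addressed with nonnegative indices and lies inside the n summed rows - outside it A still returns, but its value comes from Python's negative-index wraparound double-scaling aliased cells or from scaling rows the sum ignores, artefacts of the in-place two-pass design.
-- outside the precondition, e.g. on solution(2, [[1, 2], [3, 4]], -1, 0, 1, 1, 2): A returns 34, B returns 27; on solution(1, [[1], [2]], 0, 0, 1, 0, 3): A returns 3, B returns 7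
import Mathlib
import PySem

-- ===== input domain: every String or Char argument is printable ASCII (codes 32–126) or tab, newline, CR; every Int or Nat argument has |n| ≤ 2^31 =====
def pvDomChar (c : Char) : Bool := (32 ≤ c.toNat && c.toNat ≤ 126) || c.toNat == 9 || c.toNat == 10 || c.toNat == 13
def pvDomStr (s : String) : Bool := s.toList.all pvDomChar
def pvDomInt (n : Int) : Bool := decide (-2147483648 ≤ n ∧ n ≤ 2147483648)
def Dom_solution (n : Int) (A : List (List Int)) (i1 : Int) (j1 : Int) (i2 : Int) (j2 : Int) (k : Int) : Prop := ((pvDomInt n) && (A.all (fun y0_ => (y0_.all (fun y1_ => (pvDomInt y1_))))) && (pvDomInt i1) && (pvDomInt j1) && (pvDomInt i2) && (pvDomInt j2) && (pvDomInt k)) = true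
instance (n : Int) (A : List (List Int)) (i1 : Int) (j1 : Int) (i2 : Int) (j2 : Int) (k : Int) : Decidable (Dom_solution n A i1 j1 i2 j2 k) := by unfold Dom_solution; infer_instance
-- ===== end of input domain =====

-- B replaces A's in-place scaling pass followed by a summation of the mutated matrix with the
-- closed form total + (k-1)*block computed from the unchanged matrix (A mutates its argument
-- in place, B does not; the equivalence proved is about the return value).


-- ===== PORT A =====
-- A[i][j] = A[i][j] * k (one Python assignment, with Python's negative-index semantics)
def scaleCell (k : Int) (M : List (List Int)) (i j : Int) : List (List Int) :=
  PySem.List.pySetD M i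
    (PySem.List.pySetD (PySem.List.pyGetD M i []) j
      (PySem.List.pyGetD (PySem.List.pyGetD M i []) j 0 * k))

def solution (n : Int) (A : List (List Int)) (i1 : Int) (j1 : Int) (i2 : Int) (j2 : Int) (k : Int) : Int :=
  let A' := (PySem.List.pyRange i1 (i2 + 1) 1).foldl
    (fun M i => (PySem.List.pyRange j1 (j2 + 1) 1).foldl (fun M j => scaleCell k M i j) M) A
  (PySem.List.pyRange 0 n 1).foldl (fun answer i => answer + (PySem.List.pyGetD A' i []).sum) 0

-- ===== PORT B =====
def solution_alt (n : Int) (A : List (List Int)) (i1 : Int) (j1 : Int) (i2 : Int) (j2 : Int) (k : Int) : Int :=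
  let total := ((PySem.List.pyRange 0 n 1).map (fun i => (PySem.List.pyGetD A i []).sum)).sum
  let block := ((PySem.List.pyRange i1 (i2 + 1) 1).flatMap (fun i =>
    (PySem.List.pyRange j1 (j2 + 1) 1).map (fun j =>
      PySem.List.pyGetD (PySem.List.pyGetD A i []) j 0))).sum
  total + (k - 1) * block

-- ===== PRECONDITION & SPEC =====
-- Pre_ restricts to the natural domain: n ≤ len(A) (else the summation raises) and, when the
-- scaled block is nonempty, nonnegative block indices lying inside the n summed rows.  It
-- excludes inputs on which A still returns but whose value comes from Python's negative-index
-- wraparound double-scaling aliased cells, or from scaling rows at or beyond n that the sum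
-- ignores — artefacts of A's in-place two-pass design.
def Pre_solution (n : Int) (A : List (List Int)) (i1 : Int) (j1 : Int) (i2 : Int) (j2 : Int) (k : Int) : Prop :=
  n ≤ (A.length : Int) ∧
  ((i1 ≤ i2 ∧ j1 ≤ j2) →
    0 ≤ i1 ∧ i2 < n ∧ 0 ≤ j1 ∧
    ∀ i ∈ PySem.List.pyRange i1 (i2 + 1) 1, j2 < ((PySem.List.pyGetD A i []).length : Int))

instance (n : Int) (A : List (List Int)) (i1 : Int) (j1 : Int) (i2 : Int) (j2 : Int) (k : Int) : Decidable (Pre_solution n A i1 j1 i2 j2 k) := by unfold Pre_solution; infer_instance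

def pvWitness_solution : Int × List (List Int) × Int × Int × Int × Int × Int :=
  (2, [[1, 2], [3, 4]], 0, 0, 1, 1, 3)

def Spec_solution (n : Int) (A : List (List Int)) (i1 : Int) (j1 : Int) (i2 : Int) (j2 : Int) (k : Int) (out : Int) : Prop := out = solution_alt n A i1 j1 i2 j2 k
instance (n : Int) (A : List (List Int)) (i1 : Int) (j1 : Int) (i2 : Int) (j2 : Int) (k : Int) (out : Int) : Decidable (Spec_solution n A i1 j1 i2 j2 k out) := by unfold Spec_solution; infer_instance

-- ===== CLAIM =====
def Claim_equal_solution : Prop := ∀ (n : Int) (A : List (List Int)) (i1 : Int) (j1 : Int) (i2 : Int) (j2 : Int) (k : Int), Dom_solution n A i1 j1 i2 j2 k → Pre_solution n A i1 j1 i2 j2 k → Spec_solution n A i1 j1 i2 j2 k (solution n A i1 j1 i2 j2 k)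

-- ===== LEMMAS AND PROOFS =====

-- the Nat position designated by Python index i in a sequence of length n
def nrmIdx (n : Nat) (i : Int) : Nat := if 0 ≤ i then i.toNat else n - (-i).toNat

-- how many indices of L designate position c
def cntN (n : Nat) (L : List Int) (c : Nat) : Nat := L.countP (fun j => nrmIdx n j == c)

-- one inner-loop body of A, acting on the row
def rowStep (k : Int) (ys : List Int) (j : Int) : List Int :=
  PySem.List.pySetD ys j (PySem.List.pyGetD ys j 0 * k)

theorem pyIdx?_eq_nrm (n : Nat) (i : Int) (h : PySem.Raise.InRange n i) :
    PySem.List.pyIdx? n i = some (nrmIdx n i) := by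
  obtain ⟨h1, h2⟩ := h
  simp only [PySem.List.pyIdx?, nrmIdx]
  split_ifs <;> simp_all

theorem nrmIdx_lt (n : Nat) (i : Int) (h : PySem.Raise.InRange n i) : nrmIdx n i < n := by
  obtain ⟨h1, h2⟩ := h; simp only [nrmIdx]; split_ifs <;> omega

theorem getD_eq_nrm {α : Type} (xs : List α) (i : Int) (d : α)
    (h : PySem.Raise.InRange xs.length i) :
    PySem.List.pyGetD xs i d = xs.getD (nrmIdx xs.length i) d := by
  simp [PySem.List.pyGetD, PySem.List.pyGet?, pyIdx?_eq_nrm _ _ h, List.getD]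

theorem setD_eq_nrm {α : Type} (xs : List α) (i : Int) (v : α)
    (h : PySem.Raise.InRange xs.length i) :
    PySem.List.pySetD xs i v = xs.set (nrmIdx xs.length i) v := by
  simp [PySem.List.pySetD, PySem.List.pySet?, pyIdx?_eq_nrm _ _ h]

theorem nrmIdx_eq_iff (n : Nat) (i : Int) (c : Nat) (h : PySem.Raise.InRange n i) (hc : c < n) :
    nrmIdx n i = c ↔ (i = (c : Int) ∨ i = (c : Int) - n) := by
  obtain ⟨h1, h2⟩ := h; simp only [nrmIdx]; split_ifs <;> omega

theorem cntN_nil (n : Nat) (c : Nat) : cntN n [] c = 0 := rfl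

theorem cntN_cons (n : Nat) (j : Int) (L : List Int) (c : Nat) :
    cntN n (j :: L) c = cntN n L c + (if nrmIdx n j = c then 1 else 0) := by
  simp [cntN, List.countP_cons]

theorem row_fold (k : Int) (w : Nat) (L : List Int)
    (hL : ∀ j ∈ L, PySem.Raise.InRange w j) :
    ∀ ys : List Int, ys.length = w →
      L.foldl (rowStep k) ys = ys.mapIdx (fun c v => v * k ^ cntN w L c) := by
  induction L with
  | nil =>
    intro ys hw
    apply List.ext_getElem (by simp)
    intro c hc _
    simp [List.getElem_mapIdx, cntN_nil]
  | cons j L ih =>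
    intro ys hw
    have hj : PySem.Raise.InRange w j := hL j (by simp)
    have hj' : PySem.Raise.InRange ys.length j := hw ▸ hj
    have hlt : nrmIdx w j < w := nrmIdx_lt w j hj
    rw [List.foldl_cons,
      ih (fun x hx => hL x (by simp [hx])) (rowStep k ys j)
        (by simp [rowStep, PySem.List.length_pySetD, hw])]
    apply List.ext_getElem (by simp [rowStep, PySem.List.length_pySetD])
    intro c hc1 hc2
    have hcw : c < w := by
      simpa [rowStep, PySem.List.length_pySetD, hw] using hc1
    simp only [List.getElem_mapIdx]
    have hys : rowStep k ys j = ys.set (nrmIdx w j) (ys.getD (nrmIdx w j) 0 * k) := by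
      rw [rowStep, setD_eq_nrm _ _ _ hj', getD_eq_nrm _ _ _ hj', hw]
    simp only [hys, List.getElem_set, cntN_cons]
    by_cases hcj : nrmIdx w j = c
    · simp only [if_pos hcj]
      rw [List.getD_eq_getElem ys 0 (by omega), pow_succ]
      have hEq : ys[nrmIdx w j]'(by omega) = ys[c]'(by omega) := by congr 1
      rw [hEq]; ring
    · simp only [if_neg hcj]
      simp

theorem inner_collapse (k : Int) (jr : List Int) :
    ∀ (M : List (List Int)) (i : Int), PySem.Raise.InRange M.length i →
      jr.foldl (fun M j => scaleCell k M i j) M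
        = PySem.List.pySetD M i (jr.foldl (rowStep k) (PySem.List.pyGetD M i [])) := by
  induction jr with
  | nil =>
    intro M i hi
    have hlt := nrmIdx_lt M.length i hi
    rw [List.foldl_nil, List.foldl_nil, setD_eq_nrm _ _ _ hi, getD_eq_nrm _ _ _ hi,
      List.getD_eq_getElem M [] hlt, List.set_getElem_self]
  | cons j jr ih =>
    intro M i hi
    have hlt := nrmIdx_lt M.length i hi
    have hM' : scaleCell k M i j
        = PySem.List.pySetD M i (rowStep k (PySem.List.pyGetD M i []) j) := rfl
    have hlen : (scaleCell k M i j).length = M.length := by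
      rw [hM']; exact PySem.List.length_pySetD _ _ _
    rw [List.foldl_cons, ih _ i (by rw [hlen]; exact hi)]
    have hsetlen : (M.set (nrmIdx M.length i) (rowStep k (PySem.List.pyGetD M i []) j)).length
        = M.length := by simp
    have hget : PySem.List.pyGetD (scaleCell k M i j) i []
        = rowStep k (PySem.List.pyGetD M i []) j := by
      rw [hM', setD_eq_nrm _ _ _ hi, getD_eq_nrm _ _ _ (by rw [hsetlen]; exact hi), hsetlen,
        List.getD_eq_getElem _ [] (by simpa using hlt), List.getElem_set]
      simp
    rw [hget, hM', setD_eq_nrm _ _ _ hi,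
      setD_eq_nrm _ _ _ (by rw [hsetlen]; exact hi), hsetlen, List.set_set, List.foldl_cons,
      setD_eq_nrm _ _ _ hi]

theorem foldl_id {α β : Type} (L : List β) (M : α) : L.foldl (fun M _ => M) M = M := by
  induction L generalizing M with
  | nil => rfl
  | cons x L ih => exact ih M

theorem mapIdx_pow_zero (k : Int) (e : Nat → Nat) (he : ∀ c, e c = 0) (ys : List Int) :
    ys.mapIdx (fun c v => v * k ^ e c) = ys := by
  apply List.ext_getElem (by simp)
  intro c hc1 hc2
  simp [List.getElem_mapIdx, he]

theorem mat_fold (k : Int) (jr : List Int) (m : Nat) (L : List Int) :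
    ∀ M : List (List Int), M.length = m →
      (∀ i ∈ L, ∀ j ∈ jr, PySem.Raise.InRange m i ∧
          PySem.Raise.InRange (PySem.List.pyGetD M i []).length j) →
      L.foldl (fun M i => jr.foldl (fun M j => scaleCell k M i j) M) M
        = M.mapIdx (fun r row => row.mapIdx
            (fun c v => v * k ^ (cntN m L r * cntN row.length jr c))) := by
  induction L with
  | nil =>
    intro M hm _
    rw [List.foldl_nil]
    apply List.ext_getElem (by simp)
    intro r hr1 hr2
    simp only [List.getElem_mapIdx]
    rw [mapIdx_pow_zero k _ (fun c => by simp [cntN_nil]) (M[r]'hr1)]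
  | cons i L ih =>
    intro M hm hpre
    rcases List.eq_nil_or_concat jr with hjr | ⟨_, _, hjr'⟩
    · -- empty j-range: the loop body is the identity and every exponent is 0
      subst hjr
      rw [show (i :: L).foldl
          (fun M i => ([] : List Int).foldl (fun M j => scaleCell k M i j) M) M = M
        from foldl_id _ _]
      apply List.ext_getElem (by simp)
      intro r hr1 hr2
      simp only [List.getElem_mapIdx]
      rw [mapIdx_pow_zero k _ (fun c => by simp [cntN_nil]) (M[r]'hr1)]
    · have hjr : jr ≠ [] := by simp [hjr']
      obtain ⟨j0, hj0⟩ := List.exists_mem_of_ne_nil jr hjr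
      have hiR : PySem.Raise.InRange m i := (hpre i (by simp) j0 hj0).1
      have hiM : PySem.Raise.InRange M.length i := hm ▸ hiR
      have hni : nrmIdx m i < m := nrmIdx_lt m i hiR
      have hjw : ∀ j ∈ jr, PySem.Raise.InRange (PySem.List.pyGetD M i []).length j :=
        fun j hj => (hpre i (by simp) j hj).2
      have hrowfold : jr.foldl (rowStep k) (PySem.List.pyGetD M i [])
          = (PySem.List.pyGetD M i []).mapIdx
              (fun c v => v * k ^ cntN (PySem.List.pyGetD M i []).length jr c) :=
        row_fold k _ jr hjw _ rfl
      have hrowget : PySem.List.pyGetD M i [] = M.getD (nrmIdx m i) [] := by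
        rw [getD_eq_nrm _ _ _ hiM, hm]
      have hstep : jr.foldl (fun M j => scaleCell k M i j) M
          = M.set (nrmIdx m i) ((PySem.List.pyGetD M i []).mapIdx
              (fun c v => v * k ^ cntN (PySem.List.pyGetD M i []).length jr c)) := by
        rw [inner_collapse k jr M i hiM, hrowfold, setD_eq_nrm _ _ _ hiM, hm]
      set row := PySem.List.pyGetD M i [] with hrowdef
      set row'' := row.mapIdx (fun c v => v * k ^ cntN row.length jr c) with hrow''
      set M' := M.set (nrmIdx m i) row'' with hM'
      have hmlen : M'.length = m := by simp [hM', hm]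
      have hw'' : row''.length = row.length := by simp [hrow'']
      have hrows : ∀ i' : Int, PySem.Raise.InRange m i' →
          (PySem.List.pyGetD M' i' []).length = (PySem.List.pyGetD M i' []).length := by
        intro i' hi'
        have h1 : PySem.Raise.InRange M'.length i' := hmlen ▸ hi'
        have h2 : PySem.Raise.InRange M.length i' := hm ▸ hi'
        have hn' : nrmIdx m i' < m := nrmIdx_lt m i' hi'
        rw [getD_eq_nrm _ _ _ h1, getD_eq_nrm _ _ _ h2, hmlen, hm,
          List.getD_eq_getElem M' [] (by omega), List.getD_eq_getElem M [] (by omega)]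
        simp only [hM', List.getElem_set]
        by_cases hc : nrmIdx m i = nrmIdx m i'
        · rw [if_pos hc, hw'', hrowget, hc, List.getD_eq_getElem M [] (by omega)]
        · rw [if_neg hc]
      rw [List.foldl_cons, hstep,
        ih M' hmlen (by
          intro i' hi' j hj
          have h := hpre i' (by simp [hi']) j hj
          exact ⟨h.1, (hrows i' h.1) ▸ h.2⟩)]
      -- compare the two mapIdx forms pointwise
      apply List.ext_getElem (by simp [hM', hm])
      intro r hr1 hr2
      have hrm : r < m := by rw [List.length_mapIdx, hmlen] at hr1; omega
      have hrM : r < M.length := by omega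
      simp only [List.getElem_mapIdx]
      have hMr : M'[r]'(by rw [hmlen]; omega)
          = if nrmIdx m i = r then row'' else M[r]'hrM := by
        simp [hM', List.getElem_set]
      rw [hMr]
      by_cases hir : nrmIdx m i = r
      · rw [if_pos hir]
        have hrMrow : M[r]'hrM = row := by
          rw [hrowget, hir, List.getD_eq_getElem M [] (by omega)]
        have key : ∀ (a : Int) (s t : Nat), a * k ^ s * k ^ (t * s) = a * k ^ ((t + 1) * s) := by
          intro a s t
          rw [Nat.add_mul, one_mul, pow_add]
          ring
        apply List.ext_getElem (by simp [hw'', hrMrow])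
        intro c hc1 hc2
        simp only [hrow'', List.getElem_mapIdx, List.length_mapIdx, hrMrow]
        have hcc : cntN m (i :: L) r = cntN m L r + 1 := by rw [cntN_cons, if_pos hir]
        simp only [hcc]
        exact key _ _ _
      · rw [if_neg hir]
        have hcnt : cntN m (i :: L) r = cntN m L r := by
          rw [cntN_cons, if_neg hir]; omega
        rw [hcnt]

-- count of a single value inside a 1-step range
theorem count_pyRange (a b x : Int) :
    (PySem.List.pyRange a b 1).count x = if a ≤ x ∧ x < b then 1 else 0 := by
  by_cases h : a ≤ x ∧ x < b
  · rw [if_pos h]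
    have hm : x ∈ PySem.List.pyRange a b 1 := PySem.List.mem_pyRange_one.2 h
    have h1 : 1 ≤ (PySem.List.pyRange a b 1).count x := List.one_le_count_iff.2 hm
    have h2 : (PySem.List.pyRange a b 1).count x ≤ 1 :=
      List.nodup_iff_count_le_one.1 (PySem.List.nodup_pyRange_one a b) x
    omega
  · rw [if_neg h]
    exact List.count_eq_zero_of_not_mem (fun hm => h (PySem.List.mem_pyRange_one.1 hm))

theorem cnt_eq_counts (m : Nat) (L : List Int) (c : Nat) (hc : c < m)
    (hL : ∀ x ∈ L, PySem.Raise.InRange m x) :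
    cntN m L c = L.count (c : Int) + L.count ((c : Int) - m) := by
  induction L with
  | nil => simp [cntN_nil]
  | cons x L ih =>
    have hx := hL x (by simp)
    rw [cntN_cons, ih (fun y hy => hL y (by simp [hy])), List.count_cons, List.count_cons]
    have hiff := nrmIdx_eq_iff m x c hx hc
    obtain ⟨hx1, hx2⟩ := hx
    simp only [beq_iff_eq]
    by_cases h1 : x = (c : Int)
    · have h2 : ¬ (x = (c : Int) - m) := by omega
      rw [if_pos (hiff.2 (Or.inl h1)), if_pos h1, if_neg h2]
      omega
    · by_cases h2 : x = (c : Int) - m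
      · rw [if_pos (hiff.2 (Or.inr h2)), if_neg h1, if_pos h2]
        omega
      · rw [if_neg (fun hh => (hiff.1 hh).elim h1 h2), if_neg h1, if_neg h2]
        omega

-- with nonnegative bounds inside [0, m) the visit count is a 0/1 indicator
theorem cnt_indicator (m : Nat) (a b : Int) (ha : 0 ≤ a) (hb : b < (m : Int))
    (r : Nat) (hr : r < m) :
    cntN m (PySem.List.pyRange a (b + 1) 1) r = if a ≤ (r : Int) ∧ (r : Int) ≤ b then 1 else 0 := by
  rw [cnt_eq_counts m _ r hr (fun x hx => by
      rw [PySem.List.mem_pyRange_one] at hx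
      exact ⟨by omega, by omega⟩),
    count_pyRange, count_pyRange]
  split_ifs <;> omega

-- convert a mapIdx sum to a sum over positions
theorem mapIdx_eq_range_map (l : List Int) (f : Nat → Int → Int) :
    l.mapIdx f = (List.range l.length).map (fun c => f c (l.getD c 0)) := by
  apply List.ext_getElem (by simp)
  intro c h1 h2
  simp [List.getElem_mapIdx,
    List.getElem?_eq_getElem (show c < l.length by simpa using h1)]

theorem mapIdx_id' (l : List Int) : l.mapIdx (fun _ v => v) = l := by
  apply List.ext_getElem (by simp)
  intro c h1 h2
  simp [List.getElem_mapIdx]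

theorem sum_eq_range_map (l : List Int) :
    l.sum = ((List.range l.length).map (fun c => l.getD c 0)).sum := by
  conv_lhs => rw [← mapIdx_id' l]
  rw [mapIdx_eq_range_map]

theorem sum_map_add' (l : List Nat) (f g : Nat → Int) :
    (l.map f).sum + (l.map g).sum = (l.map (fun x => f x + g x)).sum := by
  induction l with
  | nil => simp
  | cons x l ih => simp only [List.map_cons, List.sum_cons]; rw [← ih]; ring

-- a 0/1-indicator sum over positions equals the sum over the corresponding range of indices
theorem ite_sum_pyRange (g : Int → Int) (a b : Int) (ha : 0 ≤ a) :
    ∀ w : Nat, b < (w : Int) →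
      ((List.range w).map (fun (c : Nat) => if a ≤ (c : Int) ∧ (c : Int) ≤ b then g (c : Int) else 0)).sum
        = ((PySem.List.pyRange a (b + 1) 1).map g).sum := by
  intro w
  induction w generalizing b with
  | zero =>
    intro hb
    rw [PySem.List.pyRange_one_eq_nil (by omega)]
    simp
  | succ w ih =>
    intro hb
    rw [List.range_succ, List.map_append, List.sum_append]
    by_cases hbw : b < (w : Int)
    · rw [ih b hbw]
      simp only [List.map_cons, List.map_nil, List.sum_cons, List.sum_nil]
      rw [if_neg (by omega)]
      ring
    · have hbeq : b = (w : Int) := by omega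
      subst hbeq
      by_cases haw : a ≤ (w : Int)
      · rw [PySem.List.pyRange_one_succ_right haw, List.map_append, List.sum_append]
        have hcongr : (List.range w).map
              (fun (c : Nat) => if a ≤ (c : Int) ∧ (c : Int) ≤ (w : Int) then g (c : Int) else 0)
            = (List.range w).map
              (fun (c : Nat) => if a ≤ (c : Int) ∧ (c : Int) ≤ (w : Int) - 1 then g (c : Int) else 0) := by
          apply List.map_congr_left
          intro c hc
          rw [List.mem_range] at hc
          by_cases h : a ≤ (c : Int)
          · rw [if_pos ⟨h, by omega⟩, if_pos ⟨h, by omega⟩]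
          · rw [if_neg (fun hh => h hh.1), if_neg (fun hh => h hh.1)]
        rw [hcongr, ih ((w : Int) - 1) (by omega),
          show (w : Int) - 1 + 1 = (w : Int) by ring]
        simp [haw]
      · rw [PySem.List.pyRange_one_eq_nil (by omega)]
        have hz : ((List.range w).map
            (fun (c : Nat) => if a ≤ (c : Int) ∧ (c : Int) ≤ (w : Int) then g (c : Int) else 0)).sum
            = 0 := by
          apply List.sum_eq_zero
          intro x hx
          simp only [List.mem_map, List.mem_range] at hx
          obtain ⟨c, hc, rfl⟩ := hx
          rw [if_neg (fun hh => haw (by omega))]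
        rw [hz]
        simp [haw]

-- scaling exactly the cells picked by a 0/1 indicator adds (k-1) times their sum
theorem scaled_row_sum (k : Int) (row : List Int) (P : Nat → Prop) [DecidablePred P] :
    ((List.range row.length).map
        (fun c => row.getD c 0 * k ^ (if P c then 1 else 0))).sum
      = row.sum + (k - 1) *
          ((List.range row.length).map (fun c => if P c then row.getD c 0 else 0)).sum := by
  rw [sum_eq_range_map row, ← PySem.List.sum_map_const_mul_int, sum_map_add']
  apply congrArg
  apply List.map_congr_left
  intro c hc
  by_cases h : P c
  · rw [if_pos h, if_pos h, pow_one]; ring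
  · rw [if_neg h, if_neg h, pow_zero]; ring

-- the summation of the first n rows, as a sum over Nat positions
theorem sum_rows (X : List (List Int)) (n : Int) :
    ((PySem.List.pyRange 0 n 1).map (fun i => (PySem.List.pyGetD X i []).sum)).sum
      = ((List.range n.toNat).map (fun r => (X.getD r []).sum)).sum := by
  rw [PySem.List.pyRange_one, List.map_map]
  have he : n - 0 = n := by ring
  rw [he]
  apply congrArg
  apply List.map_congr_left
  intro c hc
  simp

theorem solution_spec_aux (n : Int) (A : List (List Int)) (i1 j1 i2 j2 k : Int)
    (hp : Pre_solution n A i1 j1 i2 j2 k) :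
    solution n A i1 j1 i2 j2 k = solution_alt n A i1 j1 i2 j2 k := by
  obtain ⟨hn, hbl⟩ := hp
  have hBdef : solution_alt n A i1 j1 i2 j2 k
      = ((PySem.List.pyRange 0 n 1).map (fun i => (PySem.List.pyGetD A i []).sum)).sum
        + (k - 1) * ((PySem.List.pyRange i1 (i2 + 1) 1).flatMap (fun i =>
            (PySem.List.pyRange j1 (j2 + 1) 1).map (fun j =>
              PySem.List.pyGetD (PySem.List.pyGetD A i []) j 0))).sum := rfl
  have hblockSums : ((PySem.List.pyRange i1 (i2 + 1) 1).flatMap (fun i =>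
        (PySem.List.pyRange j1 (j2 + 1) 1).map (fun j =>
          PySem.List.pyGetD (PySem.List.pyGetD A i []) j 0))).sum
      = ((PySem.List.pyRange i1 (i2 + 1) 1).map (fun i =>
          ((PySem.List.pyRange j1 (j2 + 1) 1).map (fun j =>
            PySem.List.pyGetD (PySem.List.pyGetD A i []) j 0)).sum)).sum := by
    rw [List.flatMap, List.sum_flatten, List.map_map]; rfl
  by_cases hne : i1 ≤ i2 ∧ j1 ≤ j2
  · -- nonempty block inside [0, n) × [0, row width)
    obtain ⟨hi1, hi2n, hj1, hrows⟩ := hbl hne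
    have hi2m : i2 < (A.length : Int) := by omega
    have hidx : ∀ i ∈ PySem.List.pyRange i1 (i2 + 1) 1,
        ∀ j ∈ PySem.List.pyRange j1 (j2 + 1) 1,
        PySem.Raise.InRange A.length i ∧
          PySem.Raise.InRange (PySem.List.pyGetD A i []).length j := by
      intro i hi j hj
      rw [PySem.List.mem_pyRange_one] at hi hj
      have hw := hrows i (PySem.List.mem_pyRange_one.2 hi)
      exact ⟨⟨by omega, by omega⟩, ⟨by omega, by omega⟩⟩
    have hA : solution n A i1 j1 i2 j2 k
        = ((List.range n.toNat).map (fun r =>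
            ((A.mapIdx (fun r row => row.mapIdx (fun c v => v * k ^
              (cntN A.length (PySem.List.pyRange i1 (i2 + 1) 1) r
                * cntN row.length (PySem.List.pyRange j1 (j2 + 1) 1) c)))).getD r []).sum)).sum := by
      simp only [solution]
      rw [mat_fold k (PySem.List.pyRange j1 (j2 + 1) 1) A.length
        (PySem.List.pyRange i1 (i2 + 1) 1) A rfl hidx,
        PySem.List.foldl_add, zero_add, sum_rows]
    rw [hA, hBdef, hblockSums]
    -- per-row decomposition
    have hrow : ∀ r : Nat, r < n.toNat →
        ((A.mapIdx (fun r row => row.mapIdx (fun c v => v * k ^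
          (cntN A.length (PySem.List.pyRange i1 (i2 + 1) 1) r
            * cntN row.length (PySem.List.pyRange j1 (j2 + 1) 1) c)))).getD r []).sum
        = (A.getD r []).sum + (k - 1) *
            (if i1 ≤ (r : Int) ∧ (r : Int) ≤ i2 then
              ((PySem.List.pyRange j1 (j2 + 1) 1).map (fun j =>
                PySem.List.pyGetD (PySem.List.pyGetD A (r : Int) []) j 0)).sum
            else 0) := by
      intro r hr
      have hrm : r < A.length := by omega
      have hSrow : ((A.mapIdx (fun r row => row.mapIdx (fun c v => v * k ^
            (cntN A.length (PySem.List.pyRange i1 (i2 + 1) 1) r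
              * cntN row.length (PySem.List.pyRange j1 (j2 + 1) 1) c)))).getD r [])
          = (A.getD r []).mapIdx (fun c v => v * k ^
              (cntN A.length (PySem.List.pyRange i1 (i2 + 1) 1) r
                * cntN (A.getD r []).length (PySem.List.pyRange j1 (j2 + 1) 1) c)) := by
        rw [List.getD_eq_getElem _ [] (by simpa using hrm), List.getElem_mapIdx,
          List.getD_eq_getElem A [] hrm]
      rw [hSrow]
      have hcntR := cnt_indicator A.length i1 i2 hi1 hi2m r hrm
      by_cases hir : i1 ≤ (r : Int) ∧ (r : Int) ≤ i2
      · rw [if_pos hir] at hcntR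
        rw [if_pos hir]
        set row := A.getD r [] with hrowdef
        have hgA : PySem.List.pyGetD A (r : Int) [] = row := by
          rw [PySem.List.pyGetD_natCast]
        have hj2w : j2 < (row.length : Int) := by
          have := hrows (r : Int) (PySem.List.mem_pyRange_one.2 ⟨hir.1, by omega⟩)
          rwa [hgA] at this
        have hcells : row.mapIdx (fun c v => v * k ^
              (cntN A.length (PySem.List.pyRange i1 (i2 + 1) 1) r
                * cntN row.length (PySem.List.pyRange j1 (j2 + 1) 1) c))
            = row.mapIdx (fun c v => v * k ^
                (if j1 ≤ (c : Int) ∧ (c : Int) ≤ j2 then 1 else 0)) := by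
          rw [mapIdx_eq_range_map, mapIdx_eq_range_map]
          apply List.map_congr_left
          intro c hc
          rw [List.mem_range] at hc
          rw [hcntR, one_mul, cnt_indicator row.length j1 j2 hj1 hj2w c hc]
        rw [hcells, mapIdx_eq_range_map,
          scaled_row_sum k row (fun c => j1 ≤ (c : Int) ∧ (c : Int) ≤ j2)]
        have hconv : (List.range row.length).map
              (fun (c : Nat) => if j1 ≤ (c : Int) ∧ (c : Int) ≤ j2 then row.getD c 0 else 0)
            = (List.range row.length).map
              (fun (c : Nat) => if j1 ≤ (c : Int) ∧ (c : Int) ≤ j2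
                then PySem.List.pyGetD row (c : Int) 0 else 0) := by
          apply List.map_congr_left
          intro c hc
          simp
        rw [hconv,
          ite_sum_pyRange (fun j => PySem.List.pyGetD row j 0) j1 j2 hj1 row.length hj2w]
        have hmap : (PySem.List.pyRange j1 (j2 + 1) 1).map (fun j => PySem.List.pyGetD row j 0)
            = (PySem.List.pyRange j1 (j2 + 1) 1).map (fun j =>
                PySem.List.pyGetD (PySem.List.pyGetD A (r : Int) []) j 0) := by
          rw [hgA]
        rw [hmap]
      · rw [if_neg hir] at hcntR
        rw [if_neg hir, hcntR]
        have hz : (A.getD r []).mapIdx (fun c v => v * k ^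
              (0 * cntN (A.getD r []).length (PySem.List.pyRange j1 (j2 + 1) 1) c))
            = A.getD r [] :=
          mapIdx_pow_zero k _ (fun c => by simp) _
        rw [hz]
        ring
    -- assemble the row decompositions
    have hmapr : (List.range n.toNat).map (fun r =>
          ((A.mapIdx (fun r row => row.mapIdx (fun c v => v * k ^
            (cntN A.length (PySem.List.pyRange i1 (i2 + 1) 1) r
              * cntN row.length (PySem.List.pyRange j1 (j2 + 1) 1) c)))).getD r []).sum)
        = (List.range n.toNat).map (fun r =>
            (A.getD r []).sum + (k - 1) *
              (if i1 ≤ (r : Int) ∧ (r : Int) ≤ i2 then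
                ((PySem.List.pyRange j1 (j2 + 1) 1).map (fun j =>
                  PySem.List.pyGetD (PySem.List.pyGetD A (r : Int) []) j 0)).sum
              else 0)) := by
      apply List.map_congr_left
      intro r hr
      exact hrow r (List.mem_range.1 hr)
    rw [hmapr, ← sum_map_add', PySem.List.sum_map_const_mul_int]
    have hitesum : ((List.range n.toNat).map (fun (r : Nat) =>
          if i1 ≤ (r : Int) ∧ (r : Int) ≤ i2 then
            ((PySem.List.pyRange j1 (j2 + 1) 1).map (fun j =>
              PySem.List.pyGetD (PySem.List.pyGetD A (r : Int) []) j 0)).sum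
          else 0)).sum
        = ((PySem.List.pyRange i1 (i2 + 1) 1).map (fun i =>
            ((PySem.List.pyRange j1 (j2 + 1) 1).map (fun j =>
              PySem.List.pyGetD (PySem.List.pyGetD A i []) j 0)).sum)).sum :=
      ite_sum_pyRange (fun i => ((PySem.List.pyRange j1 (j2 + 1) 1).map (fun j =>
          PySem.List.pyGetD (PySem.List.pyGetD A i []) j 0)).sum) i1 i2 hi1 n.toNat (by omega)
    rw [hitesum, sum_rows A n]
  · -- empty block: A leaves the matrix unchanged and B's block sum is 0
    have hAid : (PySem.List.pyRange i1 (i2 + 1) 1).foldl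
        (fun M i => (PySem.List.pyRange j1 (j2 + 1) 1).foldl (fun M j => scaleCell k M i j) M) A
        = A := by
      by_cases hi : i2 + 1 ≤ i1
      · rw [PySem.List.pyRange_one_eq_nil hi, List.foldl_nil]
      · have hj : j2 + 1 ≤ j1 := by
          rcases not_and_or.1 hne with h | h <;> omega
        rw [PySem.List.pyRange_one_eq_nil hj]
        exact foldl_id _ _
    have hblock0 : ((PySem.List.pyRange i1 (i2 + 1) 1).flatMap (fun i =>
        (PySem.List.pyRange j1 (j2 + 1) 1).map (fun j =>
          PySem.List.pyGetD (PySem.List.pyGetD A i []) j 0))).sum = 0 := by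
      by_cases hi : i2 + 1 ≤ i1
      · rw [PySem.List.pyRange_one_eq_nil hi]; simp
      · have hj : j2 + 1 ≤ j1 := by
          rcases not_and_or.1 hne with h | h <;> omega
        rw [PySem.List.pyRange_one_eq_nil hj]
        simp [List.flatMap]
    rw [hBdef, hblock0]
    simp only [solution]
    rw [hAid, PySem.List.foldl_add, zero_add]
    ring

-- ===== VERDICT =====
theorem solution_spec : Claim_equal_solution := by
  unfold Claim_equal_solution Spec_solution
  intro n A i1 j1 i2 j2 k _ hpre
  exact solution_spec_aux n A i1 j1 i2 j2 k hpre
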